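-- pv_equiv track=rewrite | github.com/HuajianUP/360VOT | scripts/check_attribute_360VOT.py | checkResolution
-- ===== SOURCE A (Python) =====
-- def checkResolution(annos, low_th, high_th):
--     low = False
--     high = False
--     for index in annos:
--         anno = annos[index]
--         bbox = anno["bbox"] #bbox_rotated
--         area = bbox["h"] * bbox["w"]
--         if area < low_th:
--             low = True
--         if area > high_th:
--             high = True
--         if low and high:
--             break
--     return low, high
-- ===== SOURCE B (Python) =====
-- def checkResolution(annos, low_th, high_th):
--     extremes = None
--     for anno in annos.values():
--         bbox = anno["bbox"]
--         area = bbox["h"] * bbox["w"]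
--         if extremes is None:
--             extremes = (area, area)
--         else:
--             extremes = (min(extremes[0], area), max(extremes[1], area))
--     if extremes is None:
--         return False, False
--     return extremes[0] < low_th, extremes[1] > high_th
-- ===== Notes on version B (the rewrite author's own statement) =====
-- stated objective: alternative
-- what changed: Instead of tracking two boolean threshold flags per element with a combined early exit, B maintains the running (min, max) area extremes over annos.values() and decides both answers by two single comparisons of the extremes against the thresholds at the end.
import Mathlib
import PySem

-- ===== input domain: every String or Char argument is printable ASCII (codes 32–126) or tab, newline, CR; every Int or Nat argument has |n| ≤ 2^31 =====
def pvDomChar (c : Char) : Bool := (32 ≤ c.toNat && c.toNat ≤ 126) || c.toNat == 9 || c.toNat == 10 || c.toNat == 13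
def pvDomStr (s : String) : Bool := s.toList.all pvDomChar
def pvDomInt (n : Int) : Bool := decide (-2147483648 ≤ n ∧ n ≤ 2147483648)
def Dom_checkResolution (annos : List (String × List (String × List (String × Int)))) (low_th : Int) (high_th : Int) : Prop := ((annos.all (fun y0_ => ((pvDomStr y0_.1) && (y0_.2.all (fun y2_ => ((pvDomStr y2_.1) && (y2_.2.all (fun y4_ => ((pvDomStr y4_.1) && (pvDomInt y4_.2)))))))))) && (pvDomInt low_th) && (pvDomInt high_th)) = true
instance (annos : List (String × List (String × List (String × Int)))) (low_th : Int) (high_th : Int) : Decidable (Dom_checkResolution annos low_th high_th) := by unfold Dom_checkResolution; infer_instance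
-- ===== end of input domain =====

-- B replaces A's fused two-flag loop (with early break) by a single pass that maintains the
-- running (min, max) area extremes and compares only the extremes to the thresholds at the end
-- (objective: alternative).

-- ===== PORT A =====
-- area of one anno: anno["bbox"]["h"] * anno["bbox"]["w"]; defaults unreachable under Pre_
def pvAreaOf (anno : List (String × List (String × Int))) : Int :=
  let bbox := PySem.Dict.getD (PySem.Dict.mk anno) "bbox" []
  (PySem.Dict.getD (PySem.Dict.mk bbox) "h" 0) * (PySem.Dict.getD (PySem.Dict.mk bbox) "w" 0)

-- the for-loop of A: iterate the dict's keys, look each anno up, track two flags, break when both set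
def checkResolutionGo (d : List (String × List (String × List (String × Int)))) :
    List String → Int → Int → Bool → Bool → Bool × Bool
  | [], _low_th, _high_th, low, high => (low, high)
  | k :: ks, low_th, high_th, low, high =>
    let anno := PySem.Dict.getD (PySem.Dict.mk d) k []
    let area := pvAreaOf anno
    let low := if area < low_th then true else low
    let high := if area > high_th then true else high
    if low && high then (low, high)
    else checkResolutionGo d ks low_th high_th low high

def checkResolution (annos : List (String × List (String × List (String × Int)))) (low_th : Int) (high_th : Int) : Bool × Bool :=
  checkResolutionGo annos (annos.map (·.1)) low_th high_th false false

-- ===== PORT B =====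
-- B's loop state: None, or the pair (min area so far, max area so far)
def pvStepExtremes (acc : Option (Int × Int)) (area : Int) : Option (Int × Int) :=
  match acc with
  | none => some (area, area)
  | some (m, M) => some (min m area, max M area)

def checkResolution_alt (annos : List (String × List (String × List (String × Int)))) (low_th : Int) (high_th : Int) : Bool × Bool :=
  let extremes := annos.foldl (fun acc p => pvStepExtremes acc (pvAreaOf p.2)) none
  match extremes with
  | none => (false, false)
  | some (m, M) => (decide (m < low_th), decide (M > high_th))

-- ===== PRECONDITION & SPEC =====
-- Pre_ excludes assoc lists with duplicate keys (they encode no Python dict) and entries whose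
-- anno lacks a "bbox" dict with both "h" and "w", on which A raises KeyError.
def Pre_checkResolution (annos : List (String × List (String × List (String × Int)))) (low_th : Int) (high_th : Int) : Prop :=
  (annos.map (·.1)).Nodup ∧
  ∀ p ∈ annos, (PySem.Dict.mk p.2).contains "bbox" = true ∧
    (PySem.Dict.mk (PySem.Dict.getD (PySem.Dict.mk p.2) "bbox" [])).contains "h" = true ∧
    (PySem.Dict.mk (PySem.Dict.getD (PySem.Dict.mk p.2) "bbox" [])).contains "w" = true
instance (annos : List (String × List (String × List (String × Int)))) (low_th : Int) (high_th : Int) : Decidable (Pre_checkResolution annos low_th high_th) := by unfold Pre_checkResolution; infer_instance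

def pvWitness_checkResolution : (List (String × List (String × List (String × Int)))) × Int × Int :=
  ([("t", [("bbox", [("h", 2), ("w", 3)])])], 1, 100)

def Spec_checkResolution (annos : List (String × List (String × List (String × Int)))) (low_th : Int) (high_th : Int) (out : Bool × Bool) : Prop := out = checkResolution_alt annos low_th high_th
instance (annos : List (String × List (String × List (String × Int)))) (low_th : Int) (high_th : Int) (out : Bool × Bool) : Decidable (Spec_checkResolution annos low_th high_th out) := by unfold Spec_checkResolution; infer_instance

-- ===== CLAIM (what is proved, stated in full; the proofs are below) =====
def Claim_equal_checkResolution : Prop := ∀ (annos : List (String × List (String × List (String × Int)))) (low_th : Int) (high_th : Int), Dom_checkResolution annos low_th high_th → Pre_checkResolution annos low_th high_th → Spec_checkResolution annos low_th high_th (checkResolution annos low_th high_th)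

-- ===== LEMMAS AND PROOFS =====

-- A's loop over a suffix whose keys look up to their own values computes the two anys, flags as seeds
theorem checkResolutionGo_eq (d : List (String × List (String × List (String × Int))))
    (l : List (String × List (String × List (String × Int))))
    (hl : ∀ p ∈ l, PySem.Dict.getD (PySem.Dict.mk d) p.1 [] = p.2) :
    ∀ (low_th high_th : Int) (low high : Bool),
      checkResolutionGo d (l.map (·.1)) low_th high_th low high =
        (low || l.any (fun p => pvAreaOf p.2 < low_th),
         high || l.any (fun p => pvAreaOf p.2 > high_th)) := by
  induction l with
  | nil => intro _ _ low high; simp [checkResolutionGo]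
  | cons p rest ih =>
    intro low_th high_th low high
    have hp := hl p (by simp)
    have hrest : ∀ q ∈ rest, PySem.Dict.getD (PySem.Dict.mk d) q.1 [] = q.2 :=
      fun q hq => hl q (by simp [hq])
    simp only [List.map_cons, checkResolutionGo, hp]
    by_cases h1 : pvAreaOf p.2 < low_th <;> by_cases h2 : pvAreaOf p.2 > high_th <;>
      simp [h1, h2, ih hrest, List.any_cons] <;>
      cases low <;> cases high <;> simp

theorem getD_self_of_nodup (annos : List (String × List (String × List (String × Int))))
    (hnd : (annos.map (·.1)).Nodup) :
    ∀ p ∈ annos, PySem.Dict.getD (PySem.Dict.mk annos) p.1 [] = p.2 := by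
  intro p hp
  have hk : (PySem.Dict.mk annos).keys.Nodup := by
    simpa [PySem.Dict.keys_mk] using hnd
  have : (p.1, p.2) ∈ (PySem.Dict.mk annos).items := by
    simpa [PySem.Dict.items] using hp
  exact PySem.Dict.getD_of_mem_items _ this hk []

-- B's fold from a some-state yields componentwise fold of min and max
theorem foldl_step_some (l : List Int) :
    ∀ (m M : Int), l.foldl pvStepExtremes (some (m, M)) = some (l.foldl min m, l.foldl max M) := by
  induction l with
  | nil => intro m M; simp
  | cons a rest ih => intro m M; simp [pvStepExtremes, ih]

theorem foldl_min_lt (l : List Int) :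
    ∀ (m t : Int), (decide (l.foldl min m < t)) = (decide (m < t) || l.any (fun a => a < t)) := by
  induction l with
  | nil => intro m t; simp
  | cons a rest ih =>
    intro m t
    rw [List.foldl_cons, ih (min m a) t, List.any_cons]
    have h : (min m a < t) ↔ (m < t ∨ a < t) := min_lt_iff
    simp [h, Bool.or_assoc]

theorem foldl_max_gt (l : List Int) :
    ∀ (M t : Int), (decide (t < l.foldl max M)) = (decide (t < M) || l.any (fun a => t < a)) := by
  induction l with
  | nil => intro M t; simp
  | cons a rest ih =>
    intro M t
    rw [List.foldl_cons, ih (max M a) t, List.any_cons]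
    have h : (t < max M a) ↔ (t < M ∨ t < a) := lt_max_iff
    simp [h, Bool.or_assoc]

-- on a list of areas, B's extremes-then-compare yields the two anys
theorem extremes_eq_any (l : List Int) (lo hi : Int) :
    (match l.foldl pvStepExtremes none with
     | none => (false, false)
     | some (m, M) => (decide (m < lo), decide (M > hi))) =
      (l.any (fun a => a < lo), l.any (fun a => a > hi)) := by
  cases l with
  | nil => simp
  | cons a rest =>
    have h0 : pvStepExtremes none a = some (a, a) := rfl
    rw [List.foldl_cons, h0, foldl_step_some, List.any_cons, List.any_cons]
    simp only [gt_iff_lt]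
    rw [foldl_min_lt, foldl_max_gt]

-- B computes the two anys
theorem checkResolution_alt_eq_any (annos : List (String × List (String × List (String × Int))))
    (low_th high_th : Int) :
    checkResolution_alt annos low_th high_th =
      (annos.any (fun p => pvAreaOf p.2 < low_th),
       annos.any (fun p => pvAreaOf p.2 > high_th)) := by
  unfold checkResolution_alt
  rw [show List.foldl (fun acc p => pvStepExtremes acc (pvAreaOf p.2)) none annos
        = (annos.map (fun p => pvAreaOf p.2)).foldl pvStepExtremes none from
        List.foldl_map.symm,
      extremes_eq_any]
  simp only [List.any_map]
  rfl

-- ===== VERDICT (by name: the statement is the Claim_ definition above) =====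
theorem checkResolution_spec : Claim_equal_checkResolution := by
  intro annos low_th high_th _ hpre
  unfold Spec_checkResolution checkResolution
  rw [checkResolutionGo_eq annos annos (getD_self_of_nodup annos hpre.1),
      checkResolution_alt_eq_any]
  simp
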